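-- pv_equiv track=rewrite | github.com/adusa1019/atcoder | ABC136/D.py | solve
-- ===== SOURCE A (Python) =====
-- def solve(string):
--     n = len(string)
--     ans = [0] * n
--     count = 0
--     for i, a in enumerate(string):
--         if a == "R":
--             count += 1
--             continue
--         if count > 0:
--             ans[i] += count // 2
--             ans[i - 1] += (count + 1) // 2
--             count = 0
--     for i, a in enumerate(string[::-1]):
--         if a == "L":
--             count += 1
--             continue
--         if count > 0:
--             ans[n - i - 1] += count // 2
--             ans[n - i] += (count + 1) // 2
--             count = 0
--     return " ".join([str(a) for a in ans])
-- ===== SOURCE B (Python) =====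
-- def solve(string):
--     # Single run-based pass: decompose the string into maximal runs of equal
--     # characters, then add each run's contribution at its boundary positions.
--     n = len(string)
--     ans = [0] * n
--     runs = []  # (char, start index, length)
--     i = 0
--     while i < n:
--         j = i
--         while j < n and string[j] == string[i]:
--             j += 1
--         runs.append((string[i], i, j - i))
--         i = j
--     m = len(runs)
--     for k, (c, start, length) in enumerate(runs):
--         if c == "R" and k + 1 < m:
--             p = start + length - 1
--             ans[p] += (length + 1) // 2
--             ans[p + 1] += length // 2
--         elif c == "L" and k > 0:
--             ans[start - 1] += length // 2
--             ans[start] += (length + 1) // 2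
--     return " ".join(str(a) for a in ans)
-- ===== Notes on version B (the rewrite author's own statement) =====
-- stated objective: alternative
-- what changed: Replaces A's two directional scans (forward counting R-runs, then backward over the reversed string counting L-runs) by a single run-decomposition pass: the string is split once into maximal runs and each R-run that is not last / L-run that is not first adds its two boundary contributions directly.
import Mathlib
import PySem

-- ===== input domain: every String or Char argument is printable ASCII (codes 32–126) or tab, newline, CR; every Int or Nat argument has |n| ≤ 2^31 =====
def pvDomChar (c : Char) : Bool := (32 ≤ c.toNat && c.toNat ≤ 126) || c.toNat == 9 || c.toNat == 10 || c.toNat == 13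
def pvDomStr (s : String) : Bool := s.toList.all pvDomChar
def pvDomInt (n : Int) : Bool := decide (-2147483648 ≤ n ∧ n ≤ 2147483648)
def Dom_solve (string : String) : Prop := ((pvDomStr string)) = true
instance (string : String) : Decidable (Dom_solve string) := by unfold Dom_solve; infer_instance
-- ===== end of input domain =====

-- B replaces A's two directional scans by a single pass over the maximal-run
-- decomposition of the string (objective: alternative, same O(n) cost).
-- Equivalence is about the RETURN value; neither version mutates its argument.

-- ===== PORT A =====
-- Python 'ans[i] += v' (list element update); the only reachable out-of-range
-- index (ans[n] in the backward loop, an IndexError) is excluded by Pre_solve,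
-- and a negative i never reaches the update (the guard count > 0 forces i ≥ 1),
-- so the guarded no-op branches are never taken on admitted inputs.
def pvBump (ans : List Int) (i : Int) (v : Int) : List Int :=
  if 0 ≤ i ∧ i.toNat < ans.length then ans.modify i.toNat (· + v) else ans

-- body of 'for i, a in enumerate(string)'
def solveStep1 (st : List Int × Int) (ia : Int × Char) : List Int × Int :=
  if ia.2 = 'R' then (st.1, st.2 + 1)
  else if st.2 > 0 then
    (pvBump (pvBump st.1 ia.1 (PySem.Int.floordiv st.2 2)) (ia.1 - 1)
      (PySem.Int.floordiv (st.2 + 1) 2), 0)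
  else st

-- body of 'for i, a in enumerate(string[::-1])'
def solveStep2 (n : Int) (st : List Int × Int) (ia : Int × Char) : List Int × Int :=
  if ia.2 = 'L' then (st.1, st.2 + 1)
  else if st.2 > 0 then
    (pvBump (pvBump st.1 (n - ia.1 - 1) (PySem.Int.floordiv st.2 2)) (n - ia.1)
      (PySem.Int.floordiv (st.2 + 1) 2), 0)
  else st

def solve (string : String) : String :=
  let l := string.toList
  let n : Int := PySem.Str.len string
  -- ans = [0] * n; count = 0
  let s1 := (PySem.List.enumerate l 0).foldl solveStep1 (List.replicate l.length (0 : Int), 0)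
  -- string[::-1] is the reverse (PySem.Str.slice?_none_none_neg_one); count carries over
  let s2 := (PySem.List.enumerate l.reverse 0).foldl (solveStep2 n) s1
  PySem.Str.join " " (s2.1.map (fun a => PySem.Int.toStr a))

-- ===== PORT B =====
-- the two nested 'while' loops building runs: the inner scan of equal
-- characters is takeWhile, the outer loop the structural recursion
def pvRuns : List Char → Int → List (Char × Int × Int)
  | [], _ => []
  | c :: rest, i =>
    let k := (rest.takeWhile (fun x => x = c)).length
    (c, i, (k : Int) + 1) :: pvRuns (rest.drop k) (i + (k : Int) + 1)
termination_by l _ => l.length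
decreasing_by simp

-- body of 'for k, (c, start, length) in enumerate(runs)'
def solveAltStep (m : Int) (ans : List Int) (kr : Int × (Char × Int × Int)) : List Int :=
  if kr.2.1 = 'R' ∧ kr.1 + 1 < m then
    let p := kr.2.2.1 + kr.2.2.2 - 1
    pvBump (pvBump ans p (PySem.Int.floordiv (kr.2.2.2 + 1) 2)) (p + 1)
      (PySem.Int.floordiv kr.2.2.2 2)
  else if kr.2.1 = 'L' ∧ kr.1 > 0 then
    pvBump (pvBump ans (kr.2.2.1 - 1) (PySem.Int.floordiv kr.2.2.2 2)) kr.2.2.1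
      (PySem.Int.floordiv (kr.2.2.2 + 1) 2)
  else ans

def solve_alt (string : String) : String :=
  let l := string.toList
  let runs := pvRuns l 0
  let m : Int := runs.length
  let ans := (PySem.List.enumerate runs 0).foldl (solveAltStep m)
    (List.replicate l.length (0 : Int))
  PySem.Str.join " " (ans.map (fun a => PySem.Int.toStr a))

-- ===== PRECONDITION & SPEC =====
-- Pre_ excludes exactly the strings ending with 'R': there the leftover R-count
-- makes A's backward loop execute 'ans[n] += …', an IndexError.
def Pre_solve (string : String) : Prop := string.toList.getLast? ≠ some 'R'
instance (string : String) : Decidable (Pre_solve string) := by unfold Pre_solve; infer_instance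
def pvWitness_solve : String := "RRLL"

def Spec_solve (string : String) (out : String) : Prop := out = solve_alt string
instance (string : String) (out : String) : Decidable (Spec_solve string out) := by unfold Spec_solve; infer_instance

-- ===== CLAIM (what is proved, stated in full; the proofs are below) =====
def Claim_equal_solve : Prop := ∀ (string : String), Dom_solve string → Pre_solve string → Spec_solve string (solve string)

-- ===== LEMMAS AND PROOFS =====

-- generic shape of both of A's loops: target char tc, bump action bf
def pvLoop (tc : Char) (bf : List Int → Int → Int → List Int) :
    List Char → Int → (List Int × Int) → (List Int × Int)
  | [], _, st => st
  | a :: t, p, st =>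
    if a = tc then pvLoop tc bf t (p + 1) (st.1, st.2 + 1)
    else if st.2 > 0 then pvLoop tc bf t (p + 1) (bf st.1 p st.2, 0)
    else pvLoop tc bf t (p + 1) st

def pvBfR (ans : List Int) (p c : Int) : List Int :=
  pvBump (pvBump ans p (PySem.Int.floordiv c 2)) (p - 1) (PySem.Int.floordiv (c + 1) 2)

def pvBfL (n : Int) (ans : List Int) (p c : Int) : List Int :=
  pvBump (pvBump ans (n - p - 1) (PySem.Int.floordiv c 2)) (n - p) (PySem.Int.floordiv (c + 1) 2)

-- per-run application of the bumps (runs except the last one fire)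
def pvApply (tc : Char) (bf : List Int → Int → Int → List Int) :
    List (Char × Int × Int) → List Int → List Int
  | [], ans => ans
  | [_], ans => ans
  | (c, s, k) :: r :: rest, ans =>
    pvApply tc bf (r :: rest) (if c = tc then bf ans (s + k) k else ans)

def pvTrail (tc : Char) (l : List Char) : Int :=
  ((l.reverse.takeWhile (fun x => x = tc)).length : Int)

-- pointwise contributions
def pvCfR (s k : Int) (j : Nat) : Int :=
  (if s + k = (j : Int) then PySem.Int.floordiv k 2 else 0) +
  (if s + k - 1 = (j : Int) then PySem.Int.floordiv (k + 1) 2 else 0)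

def pvCfL (n : Int) (s k : Int) (j : Nat) : Int :=
  (if n - (s + k) - 1 = (j : Int) then PySem.Int.floordiv k 2 else 0) +
  (if n - (s + k) = (j : Int) then PySem.Int.floordiv (k + 1) 2 else 0)

def pvCbL (s k : Int) (j : Nat) : Int :=
  (if s - 1 = (j : Int) then PySem.Int.floordiv k 2 else 0) +
  (if s = (j : Int) then PySem.Int.floordiv (k + 1) 2 else 0)

def pvCB (m : Int) (j : Nat) (kr : Int × (Char × Int × Int)) : Int :=
  if kr.2.1 = 'R' ∧ kr.1 + 1 < m then pvCfR kr.2.2.1 kr.2.2.2 j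
  else if kr.2.1 = 'L' ∧ kr.1 > 0 then pvCbL kr.2.2.1 kr.2.2.2 j
  else 0

def pvS (tc : Char) (cf : Int → Int → Nat → Int) :
    List (Char × Int × Int) → Nat → Int
  | [], _ => 0
  | [_], _ => 0
  | (c, s, k) :: r :: rest, j => (if c = tc then cf s k j else 0) + pvS tc cf (r :: rest) j

theorem bridge1 (l : List Char) (p : Int) (st : List Int × Int) :
    (PySem.List.enumerate l p).foldl solveStep1 st = pvLoop 'R' pvBfR l p st := by
  induction l generalizing p st with
  | nil => simp [PySem.List.enumerate, pvLoop]
  | cons a t ih =>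
    rw [PySem.List.enumerate_cons, List.foldl_cons, pvLoop]
    by_cases ha : a = 'R' <;> by_cases hc : st.2 > 0 <;>
      simp [solveStep1, pvBfR, ha, hc, ih]

theorem bridge2 (n : Int) (l : List Char) (p : Int) (st : List Int × Int) :
    (PySem.List.enumerate l p).foldl (solveStep2 n) st = pvLoop 'L' (pvBfL n) l p st := by
  induction l generalizing p st with
  | nil => simp [PySem.List.enumerate, pvLoop]
  | cons a t ih =>
    rw [PySem.List.enumerate_cons, List.foldl_cons, pvLoop]
    by_cases ha : a = 'L' <;> by_cases hc : st.2 > 0 <;>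
      simp [solveStep2, pvBfL, ha, hc, ih]

theorem takeWhile_append_of_nil {α : Type} (q : α → Bool) (u v : List α)
    (h : v.takeWhile q = []) : (u ++ v).takeWhile q = u.takeWhile q := by
  induction u with
  | nil => simpa using h
  | cons a u ih =>
    by_cases ha : q a <;> simp [List.takeWhile_cons, ha, ih]

theorem takeWhile_append_of_exists {α : Type} (q : α → Bool) (u v : List α)
    (h : ∃ a ∈ u, ¬ q a) : (u ++ v).takeWhile q = u.takeWhile q := by
  induction u with
  | nil => rcases h with ⟨a, ha, _⟩; cases ha
  | cons b u ih =>
    by_cases hb : q b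
    · simp only [List.cons_append, List.takeWhile_cons, hb, if_true]
      rcases h with ⟨a, ha, hqa⟩
      rcases List.mem_cons.mp ha with rfl | ha'
      · exact absurd hb hqa
      · rw [ih ⟨a, ha', hqa⟩]
    · simp [List.takeWhile_cons, hb]

theorem pvLoop_replicate (tc : Char) (bf : List Int → Int → Int → List Int)
    (m : Nat) (t : List Char) (p : Int) (ans : List Int) (c : Int) :
    pvLoop tc bf (List.replicate m tc ++ t) p (ans, c) = pvLoop tc bf t (p + m) (ans, c + m) := by
  induction m generalizing p c with
  | zero => simp
  | succ m ih =>
    rw [List.replicate_succ, List.cons_append, pvLoop, if_pos rfl, ih]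
    have e1 : p + 1 + (m : Int) = p + ((m + 1 : Nat) : Int) := by push_cast; ring
    have e2 : c + 1 + (m : Int) = c + ((m + 1 : Nat) : Int) := by push_cast; ring
    rw [e1, e2]

theorem pvLoop_skip (tc : Char) (bf : List Int → Int → Int → List Int)
    (t : List Char) (ans : List Int) :
    ∀ (u : List Char), (∀ x ∈ u, x ≠ tc) → ∀ (p : Int),
      pvLoop tc bf (u ++ t) p (ans, 0) = pvLoop tc bf t (p + u.length) (ans, 0) := by
  intro u
  induction u with
  | nil => intro _ p; simp
  | cons a u ih =>
    intro h p
    rw [List.cons_append, pvLoop, if_neg (h a List.mem_cons_self), if_neg (by omega),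
      ih (fun x hx => h x (List.mem_cons_of_mem _ hx)) (p + 1)]
    have e : p + 1 + (u.length : Int) = p + (((a :: u).length : Nat) : Int) := by
      push_cast [List.length_cons]; ring
    rw [e]

theorem head_dropWhile_false {α : Type} (q : α → Bool) (l : List α) (x : α) (t : List α)
    (h : l.dropWhile q = x :: t) : q x = false := by
  have := List.head?_dropWhile_not q l
  rw [h] at this
  exact this

theorem pvLoop_cons_ne (tc : Char) (bf : List Int → Int → Int → List Int)
    (x : Char) (t : List Char) (p : Int) (ans : List Int) (hx : ¬ x = tc) :
    pvLoop tc bf (x :: t) p (ans, 0) = pvLoop tc bf t (p + 1) (ans, 0) := by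
  rw [pvLoop, if_neg hx, if_neg (by omega)]

theorem pvLoop_runs (tc : Char) (bf : List Int → Int → Int → List Int) :
    ∀ (l : List Char) (p : Int) (ans : List Int),
      pvLoop tc bf l p (ans, 0) = (pvApply tc bf (pvRuns l p) ans, pvTrail tc l) := by
  intro l p
  induction l, p using pvRuns.induct with
  | case1 p => intro ans; simp [pvRuns, pvLoop, pvApply, pvTrail]
  | case2 c rest i k ih =>
    intro ans
    have hk : k = (rest.takeWhile (fun x => decide (x = c))).length := rfl
    clear_value k
    have htw : rest.takeWhile (fun x => decide (x = c)) = List.replicate k c := by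
      rw [hk]
      exact List.eq_replicate_of_mem (fun b hb => by simpa using List.mem_takeWhile_imp hb)
    have hdrop : rest.drop k = rest.dropWhile (fun x => decide (x = c)) := by
      conv_lhs => rw [← List.takeWhile_append_dropWhile (p := fun x => decide (x = c)) (l := rest)]
      exact List.drop_left' hk.symm
    have hsplit : c :: rest = List.replicate (k + 1) c ++ rest.drop k := by
      rw [hdrop, List.replicate_succ, List.cons_append]
      congr 1
      rw [← htw, List.takeWhile_append_dropWhile]
    have hrev : (c :: rest).reverse = (rest.drop k).reverse ++ List.replicate (k + 1) c := by
      rw [hsplit, List.reverse_append, List.reverse_replicate]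
    have hR : pvRuns (c :: rest) i
        = (c, i, (k : Int) + 1) :: pvRuns (rest.drop k) (i + (k : Int) + 1) := by
      rw [pvRuns, ← hk]
    have ecast : i + (((k + 1 : Nat)) : Int) = i + (k : Int) + 1 := by push_cast; ring
    by_cases hc : c = tc
    · subst hc
      have hL : pvLoop c bf (c :: rest) i (ans, 0)
          = pvLoop c bf (rest.drop k) (i + ((k + 1 : Nat) : Int)) (ans, 0 + ((k + 1 : Nat) : Int)) := by
        conv_lhs => rw [hsplit]
        rw [pvLoop_replicate]
      cases hdk : rest.drop k with
      | nil =>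
        have hall : c :: rest = List.replicate (k + 1) c := by
          rw [hsplit, hdk, List.append_nil]
        rw [hL, hdk, pvLoop, hR, hdk, pvRuns]
        refine Prod.ext ?_ ?_
        · simp [pvApply]
        · show (0 : Int) + ((k + 1 : Nat) : Int) = pvTrail c (c :: rest)
          rw [pvTrail, hall, List.reverse_replicate, List.takeWhile_replicate]
          simp
      | cons x t2 =>
        have hx : ¬ x = c := by
          have := head_dropWhile_false (fun y => decide (y = c)) rest x t2 (by rw [← hdrop, hdk])
          simpa using this
        rw [hL, hdk, pvLoop, if_neg hx, if_pos (by omega)]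
        have hback := pvLoop_cons_ne c bf x t2 (i + ((k + 1 : Nat) : Int))
          (bf ans (i + ((k + 1 : Nat) : Int)) (0 + ((k + 1 : Nat) : Int))) hx
        rw [← hback, ← hdk, ecast, ih]
        have hne : pvRuns (rest.drop k) (i + (k : Int) + 1) ≠ [] := by
          rw [hdk, pvRuns]; simp
        refine Prod.ext ?_ ?_
        · show pvApply c bf (pvRuns (rest.drop k) (i + (k : Int) + 1)) _
            = pvApply c bf (pvRuns (c :: rest) i) ans
          rw [hR]
          rcases hcons : pvRuns (rest.drop k) (i + (k : Int) + 1) with _ | ⟨r, rs⟩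
          · exact absurd hcons hne
          · rw [pvApply, if_pos rfl]
            have e4 : (0 : Int) + ((k + 1 : Nat) : Int) = (k : Int) + 1 := by push_cast; ring
            have e5 : i + (k : Int) + 1 = i + ((k : Int) + 1) := by ring
            rw [e4, e5]
        · show pvTrail c (rest.drop k) = pvTrail c (c :: rest)
          rw [pvTrail, pvTrail, hrev, hdk]
          rw [takeWhile_append_of_exists _ _ _
            ⟨x, by simp, by simpa using hx⟩]
    · have hL : pvLoop tc bf (c :: rest) i (ans, 0)
          = pvLoop tc bf (rest.drop k) (i + (((List.replicate (k + 1) c).length : Nat) : Int)) (ans, 0) := by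
        conv_lhs => rw [hsplit]
        rw [pvLoop_skip tc bf _ _ _ (fun x hx => by
          rw [List.eq_of_mem_replicate hx]; exact hc)]
      rw [List.length_replicate] at hL
      cases hdk : rest.drop k with
      | nil =>
        have hall : c :: rest = List.replicate (k + 1) c := by
          rw [hsplit, hdk, List.append_nil]
        rw [hL, hdk, pvLoop, hR, hdk, pvRuns]
        refine Prod.ext ?_ ?_
        · simp [pvApply]
        · show (0 : Int) = pvTrail tc (c :: rest)
          rw [pvTrail, hall, List.reverse_replicate, List.takeWhile_replicate]
          simp [hc]
      | cons x t2 =>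
        rw [hL, ecast, ih]
        have hne : pvRuns (rest.drop k) (i + (k : Int) + 1) ≠ [] := by
          rw [hdk, pvRuns]; simp
        refine Prod.ext ?_ ?_
        · show _ = pvApply tc bf (pvRuns (c :: rest) i) ans
          rw [hR]
          rcases hcons : pvRuns (rest.drop k) (i + (k : Int) + 1) with _ | ⟨r, rs⟩
          · exact absurd hcons hne
          · rw [pvApply, if_neg hc]
        · show pvTrail tc (rest.drop k) = pvTrail tc (c :: rest)
          rw [pvTrail, pvTrail, hrev, hdk]
          rw [takeWhile_append_of_nil _ _ _ (by
            rw [List.takeWhile_replicate]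
            simp [hc])]

theorem pvTrail_eq_zero (tc : Char) (l : List Char) (h : l.getLast? ≠ some tc) :
    pvTrail tc l = 0 := by
  rw [pvTrail]
  rcases hrv : l.reverse with _ | ⟨a, t⟩
  · simp
  · have ha : ¬ a = tc := by
      intro rfl_a
      apply h
      rw [← List.head?_reverse, hrv, rfl_a]
      rfl
    rw [List.takeWhile_cons, if_neg (by simpa using ha)]
    simp

theorem solve_eq_apply (string : String) (h : Pre_solve string) :
    solve string = PySem.Str.join " "
      ((pvApply 'L' (pvBfL string.toList.length) (pvRuns string.toList.reverse 0)
        (pvApply 'R' pvBfR (pvRuns string.toList 0)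
          (List.replicate string.toList.length 0))).map (fun a => PySem.Int.toStr a)) := by
  have hn : PySem.Str.len string = (string.toList.length : Int) := by simp
  have htr : pvTrail 'R' string.toList = 0 := pvTrail_eq_zero _ _ h
  show PySem.Str.join " " _ = _
  rw [bridge1, pvLoop_runs, htr, bridge2, hn, pvLoop_runs]

-- run-decomposition facts
theorem tw_replicate (c : Char) (rest : List Char) :
    rest.takeWhile (fun x => decide (x = c))
      = List.replicate ((rest.takeWhile (fun x => decide (x = c))).length) c :=
  List.eq_replicate_of_mem (fun b hb => by simpa using List.mem_takeWhile_imp hb)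

theorem drop_tw (c : Char) (rest : List Char) :
    rest.drop ((rest.takeWhile (fun x => decide (x = c))).length)
      = rest.dropWhile (fun x => decide (x = c)) := by
  nth_rewrite 2 [← List.takeWhile_append_dropWhile (p := fun x => decide (x = c)) (l := rest)]
  exact List.drop_left' rfl

theorem split_tw (c : Char) (rest : List Char) :
    c :: rest = List.replicate ((rest.takeWhile (fun x => decide (x = c))).length + 1) c
      ++ rest.drop ((rest.takeWhile (fun x => decide (x = c))).length) := by
  rw [drop_tw, List.replicate_succ, List.cons_append]
  congr 1
  rw [← tw_replicate, List.takeWhile_append_dropWhile]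

theorem pvRuns_shift : ∀ (l : List Char) (i : Int), ∀ (p : Int),
    pvRuns l p = (pvRuns l i).map (fun r => (r.1, r.2.1 + (p - i), r.2.2)) := by
  intro l i
  induction l, i using pvRuns.induct with
  | case1 i => intro p; simp [pvRuns]
  | case2 c rest i k ih =>
    intro p
    have hk : k = (rest.takeWhile (fun x => decide (x = c))).length := rfl
    clear_value k
    rw [pvRuns, pvRuns, List.map_cons, ← hk]
    dsimp only
    have e1 : p + (k : Int) + 1 - (i + (k : Int) + 1) = p - i := by ring
    have e2 : i + (p - i) = p := by ring
    rw [ih (p + (k : Int) + 1), e1, e2]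

theorem pvRuns_length_eq (c : Char) (rest : List Char) :
    (rest.takeWhile (fun x => decide (x = c))).length ≤ rest.length :=
  (List.takeWhile_sublist _).length_le

theorem pvRuns_append (v : List Char) (hv : v ≠ []) :
    ∀ (u : List Char) (p : Int), u ≠ [] →
      (∀ a, u.getLast? = some a → v.head? ≠ some a) →
      pvRuns (u ++ v) p = pvRuns u p ++ pvRuns v (p + u.length) := by
  intro u p
  induction u, p using pvRuns.induct with
  | case1 p => intro hu; exact absurd rfl hu
  | case2 c rest i k ih =>
    intro _ hlast
    have hk : k = (rest.takeWhile (fun x => decide (x = c))).length := rfl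
    clear_value k
    have hkle : k ≤ rest.length := hk ▸ pvRuns_length_eq c rest
    rcases hdk : rest.drop k with _ | ⟨x, t2⟩
    · -- u is a single run: rest = replicate k c
      have hrest : rest = List.replicate k c := by
        have := split_tw c rest
        rw [← hk, hdk, List.append_nil] at this
        simpa [List.replicate_succ] using this
      have hlastu : (c :: rest).getLast? = some c := by
        have : c :: rest = List.replicate (k + 1) c := by
          rw [hrest, List.replicate_succ]
        rw [this, List.getLast?_replicate]
        simp
      have hbv : v.head? ≠ some c := hlast c hlastu
      rcases v with _ | ⟨b, v'⟩
      · exact absurd rfl hv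
      · have hb : ¬ (b = c) := fun hbc => hbv (by rw [hbc]; rfl)
        have e1 : (rest ++ b :: v').takeWhile (fun x => decide (x = c))
            = rest.takeWhile (fun x => decide (x = c)) :=
          takeWhile_append_of_nil _ _ _ (by rw [List.takeWhile_cons, if_neg (by simpa using hb)])
        have hnil : pvRuns ([] : List Char) (i + (k : Int) + 1) = [] := by rw [pvRuns]
        rw [List.cons_append, pvRuns, e1, ← hk]
        rw [List.drop_append_of_le_length hkle, hdk, List.nil_append]
        conv_rhs => rw [pvRuns, ← hk, hdk, hnil]
        rw [List.cons_append, List.nil_append]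
        have e2 : i + (k : Int) + 1 = i + (((c :: rest).length : Nat) : Int) := by
          have : rest.length = k := by rw [hrest]; simp
          push_cast [List.length_cons, this]; ring
        rw [e2]
    · -- u continues after the first run
      have hx : ¬ x = c := by
        have := head_dropWhile_false (fun y => decide (y = c)) rest x t2 (by rw [← drop_tw, ← hk, hdk])
        simpa using this
      have hxmem : x ∈ rest := List.mem_of_mem_drop (hdk ▸ List.mem_cons_self)
      have e1 : (rest ++ v).takeWhile (fun y => decide (y = c))
          = rest.takeWhile (fun y => decide (y = c)) :=
        takeWhile_append_of_exists _ _ _ ⟨x, hxmem, by simpa using hx⟩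
      have hglast : (rest.drop k).getLast? = (c :: rest).getLast? := by
        conv_rhs => rw [split_tw c rest, ← hk]
        rw [List.getLast?_append, hdk]
        rcases hgl : (x :: t2).getLast? with _ | a
        · simp [List.getLast?_eq_none_iff] at hgl
        · rfl
      have ihres := ih (by rw [hdk]; simp) (fun a ha => hlast a (by rw [← hglast]; exact ha))
      rw [List.cons_append, pvRuns, e1, ← hk, List.drop_append_of_le_length hkle, ihres]
      conv_rhs => rw [pvRuns, ← hk]
      rw [List.cons_append]
      congr 2
      have hdl : (rest.drop k).length = rest.length - k := by simp
      have e2 : i + (k : Int) + 1 + ((rest.drop k).length : Int)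
          = i + (((c :: rest).length : Nat) : Int) := by
        rw [hdl]
        push_cast [List.length_cons]
        omega
      rw [e2]

theorem pvRuns_replicate (c : Char) (m : Nat) (hm : 1 ≤ m) (p : Int) :
    pvRuns (List.replicate m c) p = [(c, p, (m : Int))] := by
  rcases m with _ | mm
  · omega
  · rw [List.replicate_succ, pvRuns]
    have htw : (List.replicate mm c).takeWhile (fun x => decide (x = c))
        = List.replicate mm c := by
      rw [List.takeWhile_replicate]; simp
    rw [htw, List.length_replicate]
    have hdrop : (List.replicate mm c).drop mm = [] := by simp
    have hnil : pvRuns ([] : List Char) (p + (mm : Int) + 1) = [] := by rw [pvRuns]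
    rw [hdrop, hnil]
    push_cast
    norm_num

theorem pvRuns_reverse : ∀ (l : List Char) (i : Int),
    pvRuns l.reverse 0 = (pvRuns l 0).reverse.map
      (fun r => (r.1, (l.length : Int) - r.2.1 - r.2.2, r.2.2)) := by
  intro l i
  induction l, i using pvRuns.induct with
  | case1 i => simp [pvRuns]
  | case2 c rest i k ih =>
    have hk : k = (rest.takeWhile (fun x => decide (x = c))).length := rfl
    clear_value k
    have hkle : k ≤ rest.length := hk ▸ pvRuns_length_eq c rest
    have hsp : c :: rest = List.replicate (k + 1) c ++ rest.drop k := by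
      have := split_tw c rest; rw [← hk] at this; exact this
    rcases hdk : rest.drop k with _ | ⟨x, t2⟩
    · have hall : c :: rest = List.replicate (k + 1) c := by
        rw [hsp, hdk, List.append_nil]
      rw [hall, List.reverse_replicate, pvRuns_replicate c (k + 1) (by omega)]
      simp
    · have hrev : (c :: rest).reverse = (rest.drop k).reverse ++ List.replicate (k + 1) c := by
        rw [hsp, List.reverse_append, List.reverse_replicate]
      have hlast : ∀ a, ((x :: t2).reverse).getLast? = some a
          → (List.replicate (k + 1) c).head? ≠ some a := by
        intro a ha
        rw [List.getLast?_reverse] at ha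
        have hxa : x = a := by simpa using ha
        have hx : ¬ x = c := by
          have := head_dropWhile_false (fun y => decide (y = c)) rest x t2
            (by rw [← drop_tw, ← hk, hdk])
          simpa using this
        intro hca
        have hc2 : c = a := by simpa [List.replicate_succ] using hca
        exact hx (hxa.trans hc2.symm)
      rw [hrev, hdk, pvRuns_append (List.replicate (k + 1) c) (by simp)
        ((x :: t2).reverse) 0 (by simp) hlast]
      rw [← hdk, ih, pvRuns_replicate c (k + 1) (by omega)]
      conv_rhs => rw [pvRuns, ← hk]
      rw [pvRuns_shift (rest.drop k) 0 (0 + (k : Int) + 1)]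
      rw [List.reverse_cons, List.map_append]
      congr 1
      · rw [← List.map_reverse, List.map_map]
        apply List.map_congr_left
        intro r _
        have hdl : ((rest.drop k).length : Int) = (rest.length : Int) - (k : Int) := by
          simp; omega
        simp only [Function.comp]
        refine Prod.ext rfl (Prod.ext ?_ rfl)
        show ((rest.drop k).length : Int) - r.2.1 - r.2.2
          = (((c :: rest).length : Nat) : Int) - (r.2.1 + (0 + (k : Int) + 1 - 0)) - r.2.2
        rw [hdl]
        push_cast [List.length_cons]
        ring
      · have hlen : (((rest.drop k).reverse.length : Nat) : Int)
            = (((c :: rest).length : Nat) : Int) - ((k : Int) + 1) := by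
          rw [List.length_reverse, List.length_drop]
          push_cast [List.length_cons]
          omega
        simp only [List.map_cons, List.map_nil]
        rw [hlen]
        simp only [List.cons.injEq, Prod.mk.injEq, and_true, true_and]
        constructor <;> push_cast <;> ring

-- pointwise value lemmas
theorem getElem?_pvBump (ans : List Int) (i v : Int) (j : Nat) :
    (pvBump ans i v)[j]? = ans[j]?.map (fun a => a + if i = (j : Int) then v else 0) := by
  unfold pvBump
  split
  · next h =>
    rw [List.getElem?_modify]
    cases hoj : ans[j]? with
    | none => simp [hoj]
    | some a =>
      simp only [hoj, Option.map_eq_map, Option.map_some, Option.some.injEq]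
      by_cases hij : i = (j : Int)
      · have h1 : i.toNat = j := by rw [hij]; simp
        rw [if_pos h1, if_pos hij]
      · have h1 : ¬ i.toNat = j := fun hh => hij (by rw [← Int.toNat_of_nonneg h.1, hh])
        rw [if_neg h1, if_neg hij, add_zero]
  · next h =>
    rcases hoj : ans[j]? with _ | a
    · simp
    · have hlt : j < ans.length := by
        by_contra hh
        rw [List.getElem?_eq_none (by omega)] at hoj
        cases hoj
      have hij : ¬ (i = (j : Int)) := by
        intro he
        exact h ⟨by omega, by omega⟩
      simp [hij]

theorem getElem?_pvBfR (ans : List Int) (s k : Int) (j : Nat) :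
    (pvBfR ans (s + k) k)[j]? = ans[j]?.map (fun a => a + pvCfR s k j) := by
  unfold pvBfR pvCfR
  rw [getElem?_pvBump, getElem?_pvBump]
  cases hoj : ans[j]? with
  | none => simp [hoj]
  | some a =>
    simp only [hoj, Option.map_some, Option.some.injEq]
    generalize PySem.Int.floordiv k 2 = A
    generalize PySem.Int.floordiv (k + 1) 2 = B
    split_ifs <;> omega

theorem getElem?_pvBfL (n : Int) (ans : List Int) (s k : Int) (j : Nat) :
    (pvBfL n ans (s + k) k)[j]? = ans[j]?.map (fun a => a + pvCfL n s k j) := by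
  unfold pvBfL pvCfL
  rw [getElem?_pvBump, getElem?_pvBump]
  cases hoj : ans[j]? with
  | none => simp [hoj]
  | some a =>
    simp only [hoj, Option.map_some, Option.some.injEq]
    generalize PySem.Int.floordiv k 2 = A
    generalize PySem.Int.floordiv (k + 1) 2 = B
    split_ifs <;> omega

theorem getElem?_pvApply (tc : Char) (bf : List Int → Int → Int → List Int)
    (cf : Int → Int → Nat → Int)
    (hb : ∀ (ans : List Int) (s k : Int) (j : Nat),
      (bf ans (s + k) k)[j]? = ans[j]?.map (fun a => a + cf s k j)) :
    ∀ (rs : List (Char × Int × Int)) (ans : List Int) (j : Nat),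
      (pvApply tc bf rs ans)[j]? = ans[j]?.map (fun a => a + pvS tc cf rs j) := by
  intro rs
  induction rs with
  | nil =>
    intro ans j
    show ans[j]? = _
    rw [pvS]
    cases hoj : ans[j]? <;> simp [hoj]
  | cons r1 rest ih =>
    intro ans j
    cases rest with
    | nil =>
      rcases r1 with ⟨c, s, k⟩
      show ans[j]? = _
      rw [pvS]
      cases hoj : ans[j]? <;> simp [hoj]
    | cons r2 rest2 =>
      rcases r1 with ⟨c, s, k⟩
      rw [pvApply, pvS]
      by_cases hc : c = tc
      · rw [if_pos hc, if_pos hc, ih, hb]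
        cases hoj : ans[j]? with
        | none => simp [hoj]
        | some a => simp [hoj]; ring
      · rw [if_neg hc, if_neg hc, ih]
        cases hoj : ans[j]? <;> simp [hoj]

theorem getElem?_solveAltStep (m : Int) (ans : List Int) (kr : Int × (Char × Int × Int)) (j : Nat) :
    (solveAltStep m ans kr)[j]? = ans[j]?.map (fun a => a + pvCB m j kr) := by
  rcases kr with ⟨idx, c, s, k⟩
  unfold solveAltStep pvCB
  split_ifs with h1 h2
  · rw [getElem?_pvBump, getElem?_pvBump]
    unfold pvCfR
    rcases ans[j]? with _ | a
    · rfl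
    · simp only [Option.map_some, Option.some.injEq]
      generalize PySem.Int.floordiv k 2 = A
      generalize PySem.Int.floordiv (k + 1) 2 = B
      split_ifs <;> omega
  · rw [getElem?_pvBump, getElem?_pvBump]
    unfold pvCbL
    rcases ans[j]? with _ | a
    · rfl
    · simp only [Option.map_some, Option.some.injEq]
      generalize PySem.Int.floordiv k 2 = A
      generalize PySem.Int.floordiv (k + 1) 2 = B
      split_ifs <;> omega
  · cases hoj : ans[j]? <;> simp [hoj]

theorem getElem?_foldB (m : Int) :
    ∀ (ps : List (Int × (Char × Int × Int))) (ans : List Int) (j : Nat),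
      (ps.foldl (solveAltStep m) ans)[j]?
        = ans[j]?.map (fun a => a + (ps.map (pvCB m j)).sum) := by
  intro ps
  induction ps with
  | nil => intro ans j; cases hoj : ans[j]? <;> simp [hoj]
  | cons q ps ih =>
    intro ans j
    rw [List.foldl_cons, ih, getElem?_solveAltStep]
    cases hoj : ans[j]? with
    | none => simp [hoj]
    | some a => simp [hoj]; ring

-- sum bookkeeping
theorem pvS_eq_sum (tc : Char) (cf : Int → Int → Nat → Int) (j : Nat) :
    ∀ rs : List (Char × Int × Int),
      pvS tc cf rs j
        = (rs.dropLast.map (fun r => if r.1 = tc then cf r.2.1 r.2.2 j else 0)).sum := by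
  intro rs
  induction rs with
  | nil => simp [pvS]
  | cons r1 rest ih =>
    cases rest with
    | nil => rcases r1 with ⟨c, s, k⟩; simp [pvS]
    | cons r2 rest2 =>
      rcases r1 with ⟨c, s, k⟩
      rw [pvS, ih]
      simp [List.dropLast]

theorem sum_enumerate_dropLast {α : Type} (F : α → Int) :
    ∀ (rs : List α) (s b : Int), b = s + rs.length →
      ((PySem.List.enumerate rs s).map
        (fun kr => if kr.1 + 1 < b then F kr.2 else 0)).sum
      = (rs.dropLast.map F).sum := by
  intro rs
  induction rs with
  | nil => intro s b h; simp [PySem.List.enumerate]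
  | cons r rest ih =>
    intro s b h
    rw [PySem.List.enumerate_cons, List.map_cons, List.sum_cons,
      ih (s + 1) b (by push_cast [List.length_cons] at h ⊢; omega)]
    cases rest with
    | nil =>
      have hlt : ¬ (s + 1 < b) := by subst h; push_cast [List.length_cons, List.length_nil]; omega
      rw [if_neg hlt]
      simp
    | cons r2 rest2 =>
      have hlt : s + 1 < b := by subst h; push_cast [List.length_cons]; omega
      rw [if_pos hlt]
      simp [List.dropLast]

theorem sum_enumerate_pos {α : Type} (G : α → Int) :
    ∀ (rs : List α) (s : Int), 1 ≤ s →
      ((PySem.List.enumerate rs s).map (fun kr => if kr.1 > 0 then G kr.2 else 0)).sum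
      = (rs.map G).sum := by
  intro rs
  induction rs with
  | nil => intro s h; simp [PySem.List.enumerate]
  | cons r rest ih =>
    intro s h
    rw [PySem.List.enumerate_cons, List.map_cons, List.sum_cons,
      ih (s + 1) (by omega), if_pos (by omega), List.map_cons, List.sum_cons]

theorem sum_enumerate_tail {α : Type} (G : α → Int) (rs : List α) :
    ((PySem.List.enumerate rs 0).map (fun kr => if kr.1 > 0 then G kr.2 else 0)).sum
      = (rs.tail.map G).sum := by
  cases rs with
  | nil => simp [PySem.List.enumerate]
  | cons r rest =>
    rw [PySem.List.enumerate_cons, List.map_cons, List.sum_cons]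
    have e : (0 : Int) + 1 = 1 := by norm_num
    rw [e, sum_enumerate_pos G rest 1 (by omega)]
    simp

theorem pvCfL_tau (n s k : Int) (j : Nat) : pvCfL n (n - s - k) k j = pvCbL s k j := by
  unfold pvCfL pvCbL
  have e1 : n - (n - s - k + k) - 1 = s - 1 := by ring
  have e2 : n - (n - s - k + k) = s := by ring
  rw [e1, e2]

theorem pvCB_split (m : Int) (j : Nat) (kr : Int × (Char × Int × Int)) :
    pvCB m j kr
      = (if kr.1 + 1 < m then (if kr.2.1 = 'R' then pvCfR kr.2.2.1 kr.2.2.2 j else 0) else 0)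
      + (if kr.1 > 0 then (if kr.2.1 = 'L' then pvCbL kr.2.2.1 kr.2.2.2 j else 0) else 0) := by
  rcases kr with ⟨idx, c, s, k⟩
  unfold pvCB
  by_cases hR : c = 'R' <;> by_cases hL : c = 'L' <;> split_ifs <;> simp_all <;> omega

theorem sum_pvCB (l : List Char) (j : Nat) :
    (((PySem.List.enumerate (pvRuns l 0) 0)).map (pvCB ((pvRuns l 0).length : Int) j)).sum
    = pvS 'R' pvCfR (pvRuns l 0) j
      + pvS 'L' (pvCfL (l.length : Int)) (pvRuns l.reverse 0) j := by
  rw [List.map_congr_left (fun kr _ => pvCB_split ((pvRuns l 0).length : Int) j kr)]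
  rw [List.sum_map_add]
  congr 1
  · rw [sum_enumerate_dropLast
      (fun r => if r.1 = 'R' then pvCfR r.2.1 r.2.2 j else 0)
      (pvRuns l 0) 0 ((pvRuns l 0).length : Int) (by push_cast; ring)]
    rw [pvS_eq_sum]
  · rw [sum_enumerate_tail (fun r => if r.1 = 'L' then pvCbL r.2.1 r.2.2 j else 0) (pvRuns l 0)]
    rw [pvS_eq_sum, pvRuns_reverse l 0, ← List.map_dropLast, List.dropLast_reverse,
      List.map_reverse, List.map_reverse, List.sum_reverse, List.map_map]
    apply congrArg
    apply List.map_congr_left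
    intro r _
    simp only [Function.comp]
    by_cases hL : r.1 = 'L' <;> simp [hL, pvCfL_tau]

theorem ans_eq (l : List Char) :
    pvApply 'L' (pvBfL (l.length : Int)) (pvRuns l.reverse 0)
      (pvApply 'R' pvBfR (pvRuns l 0) (List.replicate l.length (0 : Int)))
    = (PySem.List.enumerate (pvRuns l 0) 0).foldl (solveAltStep ((pvRuns l 0).length : Int))
        (List.replicate l.length (0 : Int)) := by
  apply List.ext_getElem?
  intro j
  rw [getElem?_pvApply 'L' (pvBfL (l.length : Int)) (pvCfL (l.length : Int))
      (getElem?_pvBfL (l.length : Int)),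
    getElem?_pvApply 'R' pvBfR pvCfR getElem?_pvBfR,
    getElem?_foldB]
  cases hoj : (List.replicate l.length (0 : Int))[j]? with
  | none => simp [hoj]
  | some a =>
    simp only [hoj, Option.map_some, Option.some.injEq]
    rw [sum_pvCB]
    ring

-- ===== VERDICT (by name: the statement is the Claim_ definition above) =====
theorem solve_spec : Claim_equal_solve := by
  intro s _ hp
  show solve s = solve_alt s
  rw [solve_eq_apply s hp, ans_eq]
  rfl
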